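-- pv_equiv track=rewrite | github.com/amirbiron/CodeBot | scripts/dev_seed.py | _split_hosts
-- ===== SOURCE A (Python) =====
-- def _split_hosts(hosts_str: str) -> list[str]:
--     """Split a MongoDB hosts string by commas, respecting IPv6 bracket notation.
--     Example: "localhost:27017,[::1]:27017,127.0.0.1" -> ["localhost:27017", "[::1]:27017", "127.0.0.1"]
--     """
--     parts: list[str] = []
--     buf: str = ""
--     in_brackets = False
--     for ch in hosts_str:
--         if ch == '[':
--             in_brackets = True
--         elif ch == ']':
--             in_brackets = False
--         if ch == ',' and not in_brackets:
--             if buf: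
--                 parts.append(buf)
--                 buf = ""
--         else:
--             buf += ch
--     if buf:
--         parts.append(buf)
--     return [p.strip() for p in parts if p.strip()]
-- ===== SOURCE B (Python) =====
-- def _last_bracket_state(tok, state):
--     for c in reversed(tok):
--         if c == '[':
--             return True
--         if c == ']':
--             return False
--     return state
--
--
-- def _split_hosts(hosts_str: str) -> list[str]:
--     """Split on commas, merging back the commas that fall inside [...] brackets."""
--     tokens = hosts_str.split(',')
--     parts = []
--     current = tokens[0]
--     in_brackets = _last_bracket_state(tokens[0], False)
--     for tok in tokens[1:]:
--         if in_brackets: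
--             current += ',' + tok
--         else:
--             parts.append(current)
--             current = tok
--         in_brackets = _last_bracket_state(tok, in_brackets)
--     parts.append(current)
--     return [p.strip() for p in parts if p.strip()]
-- ===== Notes on version B (the rewrite author's own statement) =====
-- stated objective: faster
-- what changed: B splits the whole string on every comma first (one C-level str.split) and then merges back tokens whose preceding comma was inside brackets, deriving bracket state from each token's last bracket character, instead of A's per-character Python loop with a buffer and toggle flag.
import Mathlib
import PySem

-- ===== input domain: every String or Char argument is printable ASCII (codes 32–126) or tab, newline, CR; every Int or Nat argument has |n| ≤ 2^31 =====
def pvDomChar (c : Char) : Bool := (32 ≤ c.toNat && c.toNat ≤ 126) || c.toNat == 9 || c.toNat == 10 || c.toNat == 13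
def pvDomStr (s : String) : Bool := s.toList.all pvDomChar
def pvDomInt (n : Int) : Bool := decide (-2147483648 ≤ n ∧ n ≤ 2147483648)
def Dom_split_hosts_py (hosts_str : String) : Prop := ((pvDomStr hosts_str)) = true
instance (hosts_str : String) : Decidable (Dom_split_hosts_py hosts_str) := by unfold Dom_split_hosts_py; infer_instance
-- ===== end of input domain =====

-- B splits on every comma and then merges tokens back using each token's last bracket
-- character, instead of A's single char-by-char scan with a buffer; in Python the bulk comma scan
-- is done by str.split, a constant-factor speedup a timing run measured.

-- ===== PORT A =====
-- the final "[p.strip() for p in parts if p.strip()]" line, identical in both Pythons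
def finalizeParts (parts : List (List Char)) : List String :=
  (parts.filter (fun p => PySem.Chars.strip p ≠ [])).map (fun p => String.ofList (PySem.Chars.strip p))

-- A's for-loop over the characters: state = (parts, buf, in_brackets); trailing-buf flush at the end
def goA : List Char → List (List Char) → List Char → Bool → List (List Char)
  | [], parts, buf, _ => if buf = [] then parts else parts ++ [buf]
  | c :: cs, parts, buf, inB =>
    let inB' := if c = '[' then true else if c = ']' then false else inB
    if c = ',' ∧ inB' = false then
      if buf = [] then goA cs parts [] inB'
      else goA cs (parts ++ [buf]) [] inB'
    else goA cs parts (buf ++ [c]) inB'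

def split_hosts_py (hosts_str : String) : List String :=
  finalizeParts (goA hosts_str.toList [] [] false)

-- ===== PORT B =====
-- _last_bracket_state: scan the token reversed, first bracket wins, else keep the state
def lastBracketState : List Char → Bool → Bool
  | [], st => st
  | c :: cs, st => if c = '[' then true else if c = ']' then false else lastBracketState cs st

def updState (tok : List Char) (st : Bool) : Bool := lastBracketState tok.reverse st

-- the merge loop over tokens[1:]: cur is `current`, inB the state after `current`
def runB : List (List Char) → List Char → Bool → List (List Char)
  | [], cur, _ => [cur]
  | t :: ts, cur, inB =>
    if inB then runB ts (cur ++ ',' :: t) (updState t inB)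
    else cur :: runB ts t (updState t inB)

def split_hosts_py_alt (hosts_str : String) : List String :=
  match PySem.Chars.splitOn hosts_str.toList [','] with
  | [] => []   -- unreachable: str.split(',') always yields at least one token
  | t :: ts => finalizeParts (runB ts t (updState t false))

-- ===== PRECONDITION & SPEC =====
def Spec_split_hosts_py (hosts_str : String) (out : List String) : Prop := out = split_hosts_py_alt hosts_str
instance (hosts_str : String) (out : List String) : Decidable (Spec_split_hosts_py hosts_str out) := by unfold Spec_split_hosts_py; infer_instance

-- ===== CLAIM (what is proved, stated in full; the proofs are below) =====
def Claim_equal_split_hosts_py : Prop := ∀ (hosts_str : String), Dom_split_hosts_py hosts_str → Spec_split_hosts_py hosts_str (split_hosts_py hosts_str)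

-- ===== LEMMAS AND PROOFS =====

-- a simple recursive characterisation of splitOn on the single-char separator ','
def consHead (x : List Char) : List (List Char) → List (List Char)
  | [] => [x]
  | t :: ts => (x ++ t) :: ts

def tok : List Char → List (List Char)
  | [] => [[]]
  | c :: cs => if c = ',' then [] :: tok cs else consHead [c] (tok cs)

def eraseEmpty (l : List (List Char)) : List (List Char) := l.filter (fun p => p ≠ [])

-- B's whole pass on a token list (first token merged into cur)
def runTokens : List (List Char) → List Char → Bool → List (List Char)
  | [], cur, _ => [cur]
  | t :: ts, cur, inB => runB ts (cur ++ t) (updState t inB)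

theorem consHead_ne_nil (x : List Char) (ts : List (List Char)) : consHead x ts ≠ [] := by
  cases ts <;> simp [consHead]

theorem tok_ne_nil (cs : List Char) : tok cs ≠ [] := by
  cases cs with
  | nil => simp [tok]
  | cons c cs =>
    by_cases h : c = ',' <;> simp [tok, h, consHead_ne_nil]

theorem consHead_nil (ts : List (List Char)) (h : ts ≠ []) : consHead [] ts = ts := by
  cases ts with
  | nil => exact absurd rfl h
  | cons t ts => simp [consHead]

theorem consHead_consHead (a b : List Char) (ts : List (List Char)) :
    consHead a (consHead b ts) = consHead (a ++ b) ts := by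
  cases ts <;> simp [consHead]

theorem go_spec : ∀ (fuel : Nat) (l cur : List Char) (acc : List (List Char)),
    l.length < fuel →
    PySem.Chars.splitOn.go [','] fuel l cur acc = acc.reverse ++ consHead cur.reverse (tok l) := by
  intro fuel
  induction fuel with
  | zero => intro l cur acc h; omega
  | succ fuel ih =>
    intro l cur acc h
    cases l with
    | nil => simp [PySem.Chars.splitOn.go, tok, consHead]
    | cons c rest =>
      by_cases hc : c = ','
      · subst hc
        have : [','].isPrefixOf (',' :: rest) = true := by simp [List.isPrefixOf]
        simp only [PySem.Chars.splitOn.go, this, if_pos, List.length_cons, List.length_nil,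
          List.drop_succ_cons, List.drop_zero]
        rw [ih rest [] (cur.reverse :: acc) (by simp at h ⊢; omega)]
        simp only [List.reverse_nil]
        rw [consHead_nil _ (tok_ne_nil rest)]
        simp [tok, consHead]
      · have : [','].isPrefixOf (c :: rest) = false := by
          simp [List.isPrefixOf]; exact fun hp => absurd hp.symm hc
        simp only [PySem.Chars.splitOn.go, this, Bool.false_eq_true, if_false]
        rw [ih rest (c :: cur) acc (by simp at h ⊢; omega)]
        simp [tok, hc, consHead_consHead]

theorem splitOn_eq_tok (cs : List Char) : PySem.Chars.splitOn cs [','] = tok cs := by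
  unfold PySem.Chars.splitOn
  rw [go_spec (cs.length + 1) cs [] [] (by omega)]
  simp [consHead_nil _ (tok_ne_nil cs)]

theorem goA_acc : ∀ (cs : List Char) (parts : List (List Char)) (buf : List Char) (inB : Bool),
    goA cs parts buf inB = parts ++ goA cs [] buf inB := by
  intro cs
  induction cs with
  | nil => intro parts buf inB; by_cases h : buf = [] <;> simp [goA, h]
  | cons c cs ih =>
    intro parts buf inB
    simp only [goA, List.nil_append]
    split_ifs <;> simp [ih parts, ih [buf], ih (parts ++ [buf])]

theorem lbs_append (xs : List Char) (c : Char) (st : Bool) :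
    lastBracketState (xs ++ [c]) st
      = lastBracketState xs (if c = '[' then true else if c = ']' then false else st) := by
  induction xs with
  | nil => simp [lastBracketState]
  | cons x xs ih => simp [lastBracketState, ih]

theorem upd_cons (c : Char) (u : List Char) (inB : Bool) :
    updState (c :: u) inB = updState u (if c = '[' then true else if c = ']' then false else inB) := by
  simp [updState, lbs_append]

theorem main_lemma : ∀ (cs cur : List Char) (inB : Bool),
    goA cs [] cur inB = eraseEmpty (runTokens (tok cs) cur inB) := by
  intro cs
  induction cs with
  | nil =>
    intro cur inB
    by_cases h : cur = [] <;> simp [goA, tok, runTokens, runB, eraseEmpty, h]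
  | cons c cs ih =>
    intro cur inB
    obtain ⟨u, us, htok⟩ : ∃ u us, tok cs = u :: us := by
      cases h : tok cs with
      | nil => exact absurd h (tok_ne_nil cs)
      | cons u us => exact ⟨u, us, rfl⟩
    by_cases hc : c = ','
    · subst hc
      have hA : goA (',' :: cs) [] cur inB =
          if inB = true then goA cs [] (cur ++ [',']) inB
          else (if cur = [] then ([] : List (List Char)) else [cur]) ++ goA cs [] [] inB := by
        simp only [goA, if_neg (show ¬(',' = '[') by decide), if_neg (show ¬(',' = ']') by decide)]
        cases inB with
        | true => simp
        | false =>
          simp only [Bool.false_eq_true, if_false]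
          by_cases h : cur = []
          · simp [h]
          · simp [h, goA_acc cs [cur]]
      have hB : tok (',' :: cs) = [] :: u :: us := by simp [tok, htok]
      rw [hA, hB]
      cases inB with
      | true =>
        simp only [if_pos]
        rw [ih (cur ++ [',']) true, htok]
        simp [runTokens, runB, updState, lastBracketState, List.append_assoc]
      | false =>
        simp only [Bool.false_eq_true, if_false]
        rw [ih [] false, htok]
        by_cases h : cur = [] <;>
          simp [runTokens, runB, updState, lastBracketState, eraseEmpty, h]
    · have hA : goA (c :: cs) [] cur inB =
          goA cs [] (cur ++ [c]) (if c = '[' then true else if c = ']' then false else inB) := by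
        simp only [goA]
        rw [if_neg]
        intro ⟨h1, _⟩; exact hc h1
      have hB : tok (c :: cs) = (c :: u) :: us := by simp [tok, hc, htok, consHead]
      rw [hA, hB, ih]
      rw [htok]
      simp [runTokens, upd_cons, List.append_assoc]

theorem finalize_eraseEmpty (l : List (List Char)) :
    finalizeParts (eraseEmpty l) = finalizeParts l := by
  unfold finalizeParts eraseEmpty
  rw [List.filter_filter]
  congr 1
  apply List.filter_congr
  intro p _
  by_cases h : PySem.Chars.strip p = []
  · simp [h]
  · have hp : p ≠ [] := by
      intro hnil; subst hnil; exact h (by decide)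
    simp [h, hp]

theorem ports_eq (s : String) : split_hosts_py s = split_hosts_py_alt s := by
  unfold split_hosts_py split_hosts_py_alt
  rw [splitOn_eq_tok]
  obtain ⟨u, us, htok⟩ : ∃ u us, tok s.toList = u :: us := by
    cases h : tok s.toList with
    | nil => exact absurd h (tok_ne_nil s.toList)
    | cons u us => exact ⟨u, us, rfl⟩
  rw [main_lemma s.toList [] false, htok, finalize_eraseEmpty]
  simp [runTokens]

-- ===== VERDICT (by name: the statement is the Claim_ definition above) =====
theorem split_hosts_py_spec : Claim_equal_split_hosts_py := by
  unfold Claim_equal_split_hosts_py Spec_split_hosts_py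
  intro s _
  exact ports_eq s
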